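-- pv_equiv track=rewrite | github.com/Infini-AI-Lab/UMbreLLa | umbrella/sequoia_utils.py | successor_list_to_mask
-- ===== SOURCE A (Python) =====
-- from collections import deque
--
-- def successor_list_to_mask(successor_list):
--     """
--     Generate an n x n mask matrix for a given successor list.
--
--     Parameters:
--     successor_list (list of list of int): The successor list of a directed tree.
--
--     Returns:
--     list of list of int: The mask matrix where the i-th row contains 1s for all predecessors of i (including i itself), and 0s otherwise.
--     """
--     n = len(successor_list)  # Number of nodes
--     mask = [[0] * n for _ in range(n)]
--
--     # Perform a reverse topological sort to compute predecessors for each node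
--     predecessors = [set() for _ in range(n)]  # Predecessors of each node
--     reverse_graph = [[] for _ in range(n)]
--
--     # Build the reverse graph
--     for i, successors in enumerate(successor_list):
--         for succ in successors:
--             reverse_graph[succ].append(i)
--
--     # Use BFS/DFS to find all predecessors for each node
--     for node in range(n):
--         visited = set()
--         queue = deque([node])
--
--         while queue:
--             current = queue.popleft()
--             if current not in visited:
--                 visited.add(current)
--                 predecessors[node].add(current)
--                 queue.extend(reverse_graph[current])
--
--     # Fill the mask matrix
--     for i in range(n):
--         for pred in predecessors[i]:
--             mask[i][pred] = 1
--
--     return mask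
-- ===== SOURCE B (Python) =====
-- def successor_list_to_mask(successor_list):
--     """Ancestor-inclusion mask via Floyd-Warshall reflexive-transitive closure
--     instead of per-node BFS over a reverse graph."""
--     n = len(successor_list)
--     # Reflexive base: identity matrix, plus one edge bit per (node, successor) pair.
--     mask = [[1 if i == j else 0 for j in range(n)] for i in range(n)]
--     for j, succs in enumerate(successor_list):
--         for s in succs:
--             mask[s][j] = 1
--     # Floyd-Warshall closure: allow k as an intermediate node.
--     for k in range(n):
--         row_k = mask[k]
--         mask = [[1 if (row[k] and row_k[j]) else row[j] for j in range(n)]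
--                 for row in mask]
--     return mask
-- ===== Notes on version B (the rewrite author's own statement) =====
-- stated objective: alternative
-- what changed: Replaces the reverse-graph construction plus per-node BFS (queue/visited-set traversal for every node) by a single reachability matrix computed as a Floyd-Warshall reflexive-transitive closure of the direct-predecessor relation.
import Mathlib
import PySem

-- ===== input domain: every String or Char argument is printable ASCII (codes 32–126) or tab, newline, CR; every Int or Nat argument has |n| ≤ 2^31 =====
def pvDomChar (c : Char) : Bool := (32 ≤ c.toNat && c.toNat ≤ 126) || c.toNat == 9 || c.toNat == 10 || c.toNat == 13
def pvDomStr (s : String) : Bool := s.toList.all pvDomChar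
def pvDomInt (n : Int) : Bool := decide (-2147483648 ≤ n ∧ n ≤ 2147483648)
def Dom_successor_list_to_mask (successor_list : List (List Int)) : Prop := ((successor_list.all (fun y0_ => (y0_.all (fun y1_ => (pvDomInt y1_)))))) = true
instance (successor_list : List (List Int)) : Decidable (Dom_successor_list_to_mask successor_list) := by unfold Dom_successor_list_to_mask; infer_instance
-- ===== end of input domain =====

-- B replaces A's reverse-graph + per-node BFS by a Floyd–Warshall reflexive-transitive
-- closure of the direct-predecessor relation (alternative algorithm, same exact output).

-- ===== PORT A =====

-- Python list index semantics: a negative index counts from the end.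
def pvEff (n : Nat) (s : Int) : Int := if s < 0 then s + n else s

-- reverse_graph[succ].append(i); out-of-range index raises in Python (excluded by Pre_).
def pvUpdRev (n : Nat) (i : Nat) (rg : List (List Nat)) (s : Int) : List (List Nat) :=
  let e := pvEff n s
  if 0 ≤ e ∧ e < (n : Int) then rg.modify e.toNat (fun r => r ++ [i]) else rg

def pvBuildRev (sl : List (List Int)) : List (List Nat) :=
  sl.zipIdx.foldl (fun rg p => p.1.foldl (pvUpdRev sl.length p.2) rg)
    (List.replicate sl.length [])

-- the BFS while-loop; fuel bounds the number of iterations (1 + total edges suffices,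
-- proved below); `rev.getD c []` is reverse_graph[current], always in range here.
def pvBfs (rev : List (List Nat)) : Nat → List Nat → List Nat → List Nat
  | 0, _, vis => vis
  | _ + 1, [], vis => vis
  | f + 1, c :: q, vis =>
    if c ∈ vis then pvBfs rev f q vis
    else pvBfs rev f (q ++ rev.getD c []) (vis ++ [c])

def successor_list_to_mask (successor_list : List (List Int)) : List (List Int) :=
  let n := successor_list.length
  let rev := pvBuildRev successor_list
  let fuel := 1 + (rev.map List.length).sum
  let preds := (List.range n).map (fun node => pvBfs rev fuel [node] [])
  (List.range n).map (fun i =>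
    (preds.getD i []).foldl (fun row p => row.set p (1 : Int)) (List.replicate n (0 : Int)))

-- ===== PORT B =====

-- mask[s][j] = 1 for each direct edge; same Python index semantics as in A's build.
def pvUpdMask (n : Nat) (j : Nat) (M : List (List Int)) (s : Int) : List (List Int) :=
  let e := pvEff n s
  if 0 ≤ e ∧ e < (n : Int) then M.modify e.toNat (fun row => row.set j (1 : Int)) else M

-- one Floyd–Warshall phase: allow k as an intermediate node.
def pvFwPhase (n : Nat) (M : List (List Int)) (k : Nat) : List (List Int) :=
  let rowk := M.getD k []
  M.map (fun row => (List.range n).map (fun j =>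
    if row.getD k 0 ≠ 0 ∧ rowk.getD j 0 ≠ 0 then (1 : Int) else row.getD j 0))

def successor_list_to_mask_alt (successor_list : List (List Int)) : List (List Int) :=
  let n := successor_list.length
  let init := (List.range n).map (fun i =>
    (List.range n).map (fun j => if i = j then (1 : Int) else 0))
  let withE := successor_list.zipIdx.foldl (fun M p => p.1.foldl (pvUpdMask n p.2) M) init
  (List.range n).foldl (pvFwPhase n) withE

-- ===== PRECONDITION & SPEC =====
-- Pre_ excludes exactly the inputs where Python A raises IndexError: a successor
-- outside [-n, n) (negative successors in range wrap around, as in Python; A returns there).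
def Pre_successor_list_to_mask (successor_list : List (List Int)) : Prop :=
  ∀ row ∈ successor_list, ∀ s ∈ row,
    -(successor_list.length : Int) ≤ s ∧ s < (successor_list.length : Int)

instance (successor_list : List (List Int)) : Decidable (Pre_successor_list_to_mask successor_list) := by
  unfold Pre_successor_list_to_mask; infer_instance

def pvWitness_successor_list_to_mask : List (List Int) := [[1], [0, -2]]

def Spec_successor_list_to_mask (successor_list : List (List Int)) (out : List (List Int)) : Prop := out = successor_list_to_mask_alt successor_list
instance (successor_list : List (List Int)) (out : List (List Int)) : Decidable (Spec_successor_list_to_mask successor_list out) := by unfold Spec_successor_list_to_mask; infer_instance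

-- ===== CLAIM (what is proved, stated in full; the proofs are below) =====
def Claim_equal_successor_list_to_mask : Prop := ∀ (successor_list : List (List Int)), Dom_successor_list_to_mask successor_list → Pre_successor_list_to_mask successor_list → Spec_successor_list_to_mask successor_list (successor_list_to_mask successor_list)

-- ===== LEMMAS AND PROOFS =====

-- ---- paths with bounded intermediate nodes ----

def pvChain (E : Nat → Nat → Prop) : Nat → List Nat → Prop
  | _, [] => True
  | i, x :: l => E i x ∧ pvChain E x l

-- pvBd rev k i j: there is a path i → j along rev-edges whose interior nodes are all < k.
def pvBd (rev : List (List Nat)) (k i j : Nat) : Prop :=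
  i = j ∨ ∃ l : List Nat, (∀ x ∈ l, x < k) ∧
    pvChain (fun a b => b ∈ rev.getD a []) i (l ++ [j])

theorem pvChain_split (E : Nat → Nat → Prop) (l1 : List Nat) (x : Nat) (l2 : List Nat) :
    ∀ i, pvChain E i (l1 ++ x :: l2) ↔ (pvChain E i (l1 ++ [x]) ∧ pvChain E x l2) := by
  induction l1 with
  | nil => intro i; simp [pvChain]
  | cons a l1 ih => intro i; simp only [List.cons_append, pvChain, ih a]; tauto

theorem pvBd_refl (rev : List (List Nat)) (k i : Nat) : pvBd rev k i i := Or.inl rfl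

theorem pvBd_mono (rev : List (List Nat)) {k k' i j : Nat} (h : k ≤ k') :
    pvBd rev k i j → pvBd rev k' i j := by
  rintro (rfl | ⟨l, hl, hc⟩)
  · exact Or.inl rfl
  · exact Or.inr ⟨l, fun x hx => lt_of_lt_of_le (hl x hx) h, hc⟩

theorem pvBd_snoc (rev : List (List Nat)) {k i c d : Nat}
    (h : pvBd rev k i c) (hc : c < k) (hd : d ∈ rev.getD c []) : pvBd rev k i d := by
  rcases h with rfl | ⟨l, hl, hch⟩
  · exact Or.inr ⟨[], by simp, by simpa [pvChain] using hd⟩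
  · refine Or.inr ⟨l ++ [c], ?_, ?_⟩
    · intro x hx; rcases List.mem_append.1 hx with hx | hx
      · exact hl x hx
      · simpa using (List.mem_singleton.1 hx ▸ hc)
    · rw [List.append_assoc]
      exact (pvChain_split _ l c [d] i).2 ⟨hch, ⟨hd, trivial⟩⟩

theorem pvFirstOcc {l : List Nat} {k : Nat} (h : k ∈ l) :
    ∃ l1 l2, l = l1 ++ k :: l2 ∧ k ∉ l1 := by
  induction l with
  | nil => simp at h
  | cons a l ih =>
    by_cases ha : a = k
    · exact ⟨[], l, by simp [ha], by simp⟩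
    · have hk : k ∈ l := by
        rcases List.mem_cons.1 h with h' | h'
        · exact absurd h'.symm ha
        · exact h'
      rcases ih hk with ⟨l1, l2, rfl, hnk⟩
      refine ⟨a :: l1, l2, by simp, ?_⟩
      simp only [List.mem_cons, not_or]
      exact ⟨fun h' => ha h'.symm, hnk⟩

theorem pvBd_succ_aux (rev : List (List Nat)) (k j : Nat) :
    ∀ (m : Nat) (l : List Nat) (i : Nat), l.length ≤ m → (∀ x ∈ l, x < k + 1) →
      pvChain (fun a b => b ∈ rev.getD a []) i (l ++ [j]) →
      pvBd rev k i j ∨ (pvBd rev k i k ∧ pvBd rev k k j) := by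
  intro m
  induction m with
  | zero =>
    intro l i hlen _ hc
    have : l = [] := List.eq_nil_of_length_eq_zero (Nat.le_zero.1 hlen)
    subst this
    exact Or.inl (Or.inr ⟨[], by simp, hc⟩)
  | succ m ih =>
    intro l i hlen hlt hc
    by_cases hk : k ∈ l
    · rcases pvFirstOcc hk with ⟨l1, l2, rfl, hk1⟩
      rw [List.append_assoc] at hc
      have hsp := (pvChain_split (fun a b => b ∈ rev.getD a []) l1 k (l2 ++ [j]) i).1 hc
      have h1 : pvBd rev k i k := Or.inr ⟨l1, ?_, hsp.1⟩
      · have hlen2 : l2.length ≤ m := by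
          have := hlen; simp [List.length_append] at this; omega
        have h2 : pvBd rev k k j := by
          rcases ih l2 k hlen2 (fun x hx => hlt x (by simp [hx])) hsp.2 with h | h
          · exact h
          · exact h.2
        exact Or.inr ⟨h1, h2⟩
      · intro x hx
        have hx' : x < k + 1 := hlt x (by simp [hx])
        have : x ≠ k := fun h => hk1 (h ▸ hx)
        omega
    · refine Or.inl (Or.inr ⟨l, ?_, hc⟩)
      intro x hx
      have : x ≠ k := fun h => hk (h ▸ hx)
      have := hlt x hx; omega

theorem pvBd_succ (rev : List (List Nat)) (k i j : Nat) :
    pvBd rev (k + 1) i j ↔ pvBd rev k i j ∨ (pvBd rev k i k ∧ pvBd rev k k j) := by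
  constructor
  · rintro (rfl | ⟨l, hl, hc⟩)
    · exact Or.inl (pvBd_refl rev k i)
    · exact pvBd_succ_aux rev k j l.length l i le_rfl hl hc
  · rintro (h | ⟨h1, h2⟩)
    · exact pvBd_mono rev (Nat.le_succ k) h
    · rcases h1 with rfl | ⟨l1, hl1, hc1⟩
      · exact pvBd_mono rev (Nat.le_succ _) h2
      · rcases h2 with rfl | ⟨l2, hl2, hc2⟩
        · exact Or.inr ⟨l1, fun x hx => Nat.lt_succ_of_lt (hl1 x hx), hc1⟩
        · refine Or.inr ⟨l1 ++ k :: l2, ?_, ?_⟩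
          · intro x hx
            rcases List.mem_append.1 hx with hx | hx
            · exact Nat.lt_succ_of_lt (hl1 x hx)
            · rcases List.mem_cons.1 hx with rfl | hx
              · exact Nat.lt_succ_self _
              · exact Nat.lt_succ_of_lt (hl2 x hx)
          · rw [List.append_assoc, List.cons_append]
            exact (pvChain_split _ l1 _ (l2 ++ [j]) i).2 ⟨hc1, hc2⟩

theorem pvBd_zero (rev : List (List Nat)) (i j : Nat) :
    pvBd rev 0 i j ↔ (i = j ∨ j ∈ rev.getD i []) := by
  constructor
  · rintro (rfl | ⟨l, hl, hc⟩)
    · exact Or.inl rfl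
    · have : l = [] := by
        cases l with
        | nil => rfl
        | cons x l => exact absurd (hl x (by simp)) (by omega)
      subst this
      exact Or.inr hc.1
  · rintro (rfl | h)
    · exact Or.inl rfl
    · exact Or.inr ⟨[], by simp, by simpa [pvChain] using h⟩


-- ---- BFS: soundness, termination measure, and completeness ----

theorem pvBfs_sound (rev : List (List Nat)) (n i : Nat)
    (hrev : ∀ a, ∀ b ∈ rev.getD a [], b < n) :
    ∀ (fuel : Nat) (q vis : List Nat),
      (∀ x ∈ q, pvBd rev n i x) → (∀ x ∈ vis, pvBd rev n i x) → (∀ x ∈ q, x < n) →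
      ∀ x ∈ pvBfs rev fuel q vis, pvBd rev n i x := by
  intro fuel
  induction fuel with
  | zero => intro q vis _ hv _ x hx; exact hv x hx
  | succ f ih =>
    intro q vis hq hv hqn x hx
    match q with
    | [] => exact hv x hx
    | c :: q' =>
      by_cases hc : c ∈ vis
      · rw [pvBfs, if_pos hc] at hx
        exact ih q' vis (fun y hy => hq y (by simp [hy])) hv
          (fun y hy => hqn y (by simp [hy])) x hx
      · rw [pvBfs, if_neg hc] at hx
        have hbc : pvBd rev n i c := hq c (by simp)
        have hcn : c < n := hqn c (by simp)
        refine ih (q' ++ rev.getD c []) (vis ++ [c]) ?_ ?_ ?_ x hx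
        · intro y hy
          rcases List.mem_append.1 hy with hy | hy
          · exact hq y (by simp [hy])
          · exact pvBd_snoc rev hbc hcn hy
        · intro y hy
          rcases List.mem_append.1 hy with hy | hy
          · exact hv y hy
          · rw [List.mem_singleton.1 hy]; exact hbc
        · intro y hy
          rcases List.mem_append.1 hy with hy | hy
          · exact hqn y (by simp [hy])
          · exact hrev c y hy

-- remaining work bound: pending queue entries plus edges of still-unvisited nodes
def pvW (rev : List (List Nat)) (n : Nat) (vis : List Nat) : Nat :=
  (((List.range n).filter (fun c => c ∉ vis)).map (fun c => (rev.getD c []).length)).sum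

theorem pvW_drop (rev : List (List Nat)) (n : Nat) (vis : List Nat) (c : Nat)
    (hc : c < n) (hcv : c ∉ vis) :
    pvW rev n vis = (rev.getD c []).length + pvW rev n (vis ++ [c]) := by
  classical
  set l := (List.range n).filter (fun c => c ∉ vis) with hl
  have hmem : c ∈ l := by
    simp [hl, List.mem_filter, List.mem_range, hc, hcv]
  have hnd : l.Nodup := (List.nodup_range).filter _
  have hperm : l.Perm (c :: l.erase c) := List.perm_cons_erase hmem
  have herase : l.erase c = l.filter (fun x => x ≠ c) := by
    rw [List.Nodup.erase_eq_filter hnd]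
    apply List.filter_congr
    intro x _
    by_cases h : x = c <;> simp [h]
  have hfilt : (List.range n).filter (fun x => x ∉ vis ++ [c]) = l.filter (fun x => x ≠ c) := by
    rw [hl, List.filter_filter]
    apply List.filter_congr
    intro x _
    simp [List.mem_append, not_or, and_comm]
  unfold pvW
  rw [hfilt, ← herase]
  calc ((List.range n).filter (fun c => c ∉ vis) |>.map
          (fun c => (rev.getD c []).length)).sum
      = ((c :: l.erase c).map (fun c => (rev.getD c []).length)).sum := by
        rw [← hl]; exact List.Perm.sum_eq (hperm.map _)
    _ = (rev.getD c []).length + ((l.erase c).map (fun c => (rev.getD c []).length)).sum := by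
        simp


theorem pvBfs_master (rev : List (List Nat)) (n : Nat)
    (hrev : ∀ a, ∀ b ∈ rev.getD a [], b < n) :
    ∀ (fuel : Nat) (q vis : List Nat),
      q.length + pvW rev n vis ≤ fuel →
      (∀ x ∈ q, x < n) → (∀ c ∈ vis, c < n) →
      (∀ c ∈ vis, ∀ x ∈ rev.getD c [], x ∈ vis ∨ x ∈ q) →
      (∀ x ∈ q, x ∈ pvBfs rev fuel q vis) ∧ (∀ c ∈ vis, c ∈ pvBfs rev fuel q vis) ∧
      (∀ c ∈ pvBfs rev fuel q vis, c < n) ∧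
      (∀ c ∈ pvBfs rev fuel q vis, ∀ x ∈ rev.getD c [], x ∈ pvBfs rev fuel q vis) := by
  intro fuel
  induction fuel with
  | zero =>
    intro q vis hfuel hq hvis hcl
    have hq0 : q = [] := List.eq_nil_of_length_eq_zero (by omega)
    subst hq0
    refine ⟨by simp, fun c hc => hc, hvis, ?_⟩
    intro c hc x hx
    rcases hcl c hc x hx with h | h
    · exact h
    · simp at h
  | succ f ih =>
    intro q vis hfuel hq hvis hcl
    match q with
    | [] =>
      refine ⟨by simp, fun c hc => hc, hvis, ?_⟩
      intro c hc x hx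
      rcases hcl c hc x hx with h | h
      · exact h
      · simp at h
    | c :: q' =>
      by_cases hc : c ∈ vis
      · rw [pvBfs, if_pos hc]
        have hcl' : ∀ c' ∈ vis, ∀ x ∈ rev.getD c' [], x ∈ vis ∨ x ∈ q' := by
          intro c' hc' x hx
          rcases hcl c' hc' x hx with h | h
          · exact Or.inl h
          · rcases List.mem_cons.1 h with rfl | h
            · exact Or.inl hc
            · exact Or.inr h
        have := ih q' vis (by simp only [List.length_cons] at hfuel; omega)
          (fun y hy => hq y (by simp [hy])) hvis hcl'
        refine ⟨?_, this.2.1, this.2.2.1, this.2.2.2⟩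
        intro x hx
        rcases List.mem_cons.1 hx with rfl | hx
        · exact this.2.1 x hc
        · exact this.1 x hx
      · rw [pvBfs, if_neg hc]
        have hcn : c < n := hq c (by simp)
        have hWd := pvW_drop rev n vis c hcn hc
        have hfuel' : (q' ++ rev.getD c []).length + pvW rev n (vis ++ [c]) ≤ f := by
          rw [List.length_append]
          simp only [List.length_cons] at hfuel
          omega
        have hq' : ∀ x ∈ q' ++ rev.getD c [], x < n := by
          intro x hx
          rcases List.mem_append.1 hx with hx | hx
          · exact hq x (by simp [hx])
          · exact hrev c x hx
        have hvis' : ∀ x ∈ vis ++ [c], x < n := by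
          intro x hx
          rcases List.mem_append.1 hx with hx | hx
          · exact hvis x hx
          · rw [List.mem_singleton.1 hx]; exact hcn
        have hcl' : ∀ c' ∈ vis ++ [c], ∀ x ∈ rev.getD c' [],
            x ∈ vis ++ [c] ∨ x ∈ q' ++ rev.getD c [] := by
          intro c' hc' x hx
          rcases List.mem_append.1 hc' with hc' | hc'
          · rcases hcl c' hc' x hx with h | h
            · exact Or.inl (by simp [h])
            · rcases List.mem_cons.1 h with rfl | h
              · exact Or.inl (by simp)
              · exact Or.inr (by simp [h])
          · rw [List.mem_singleton.1 hc'] at hx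
            exact Or.inr (List.mem_append.2 (Or.inr hx))
        have := ih (q' ++ rev.getD c []) (vis ++ [c]) hfuel' hq' hvis' hcl'
        refine ⟨?_, ?_, this.2.2.1, this.2.2.2⟩
        · intro x hx
          rcases List.mem_cons.1 hx with rfl | hx
          · exact this.2.1 x (by simp)
          · exact this.1 x (by simp [hx])
        · intro c' hc'
          exact this.2.1 c' (by simp [hc'])

theorem pvBfs_reaches (rev : List (List Nat)) (n : Nat) (V : List Nat) (i : Nat)
    (hiV : i ∈ V) (hclosed : ∀ c ∈ V, ∀ x ∈ rev.getD c [], x ∈ V) :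
    ∀ j, pvBd rev n i j → j ∈ V := by
  have aux : ∀ (l : List Nat) (a : Nat) (j : Nat), a ∈ V →
      pvChain (fun a b => b ∈ rev.getD a []) a (l ++ [j]) → j ∈ V := by
    intro l
    induction l with
    | nil => intro a j ha hch; exact hclosed a ha j hch.1
    | cons x l ihl => intro a j ha hch; exact ihl x j (hclosed a ha x hch.1) hch.2
  rintro j (rfl | ⟨l, _, hch⟩)
  · exact hiV
  · exact aux l i j hiV hch


-- ---- matrix plumbing ----

def pvMget (M : List (List Int)) (i j : Nat) : Int := (M.getD i []).getD j 0

theorem pvGetD_oob {α : Type} (d : α) (l : List α) (a : Nat) (h : l.length ≤ a) :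
    l.getD a d = d := by
  rw [List.getD_eq_getElem?_getD, List.getElem?_eq_none (by omega)]
  rfl

theorem pvGetD_modify {α : Type} (d : α) (l : List α) (e : Nat) (f : α → α) (a : Nat) :
    (l.modify e f).getD a d = if e = a ∧ a < l.length then f (l.getD a d) else l.getD a d := by
  by_cases ha : a < l.length
  · have h1 : (l.modify e f).getD a d = (l.modify e f)[a]'(by simpa using ha) :=
      List.getD_eq_getElem _ _ (by simpa using ha)
    have h2 : l.getD a d = l[a] := List.getD_eq_getElem _ _ ha
    rw [h1, List.getElem_modify, h2]
    by_cases he : e = a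
    · rw [if_pos he, if_pos ⟨he, ha⟩]
    · rw [if_neg he, if_neg (by simp [he])]
  · rw [pvGetD_oob d _ a (by simpa using Nat.le_of_not_lt ha), pvGetD_oob d l a (Nat.le_of_not_lt ha),
      if_neg (fun h => ha h.2)]

theorem pvGetD_set {α : Type} (d : α) (l : List α) (p : Nat) (v : α) (j : Nat) :
    (l.set p v).getD j d = if p = j ∧ j < l.length then v else l.getD j d := by
  by_cases hj : j < l.length
  · rw [List.getD_eq_getElem _ _ (by simpa using hj), List.getD_eq_getElem _ _ hj,
      List.getElem_set]
    by_cases hp : p = j <;> simp [hp, hj]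
  · rw [pvGetD_oob d _ j (by simpa using Nat.le_of_not_lt hj), pvGetD_oob d l j (Nat.le_of_not_lt hj)]
    simp
    intro _ h
    exact absurd h hj

theorem pvGetD_mapRange {α : Type} (d : α) (n a : Nat) (g : Nat → α) (h : a < n) :
    ((List.range n).map g).getD a d = g a := by
  rw [List.getD_eq_getElem _ _ (by simp [h])]
  simp

-- joint invariant of A's reverse-graph build and B's base-matrix build
def pvInvP (n : Nat) (rg : List (List Nat)) (M : List (List Int)) : Prop :=
  rg.length = n ∧ M.length = n ∧ (∀ a, a < n → (M.getD a []).length = n) ∧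
  (∀ a, ∀ b ∈ rg.getD a [], b < n) ∧
  (∀ a b, a < n → b < n → (pvMget M a b = 1 ↔ (a = b ∨ b ∈ rg.getD a []))) ∧
  (∀ a b, a < n → b < n → (pvMget M a b = 0 ∨ pvMget M a b = 1))

theorem pvInvP_upd (n : Nat) (rg : List (List Nat)) (M : List (List Int)) (i : Nat) (s : Int)
    (hInv : pvInvP n rg M) (hi : i < n) (hs1 : -(n : Int) ≤ s) (hs2 : s < n) :
    pvInvP n (pvUpdRev n i rg s) (pvUpdMask n i M s) := by
  obtain ⟨hrg, hM, hrow, hbnd, hiff, h01⟩ := hInv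
  have hg : 0 ≤ pvEff n s ∧ pvEff n s < (n : Int) := by
    unfold pvEff
    split <;> omega
  have hen : (pvEff n s).toNat < n := by omega
  unfold pvUpdRev pvUpdMask
  rw [if_pos hg, if_pos hg]
  set e := (pvEff n s).toNat with he
  have hgetRg : ∀ a, (rg.modify e (fun r => r ++ [i])).getD a [] =
      if e = a then rg.getD a [] ++ [i] else rg.getD a [] := by
    intro a
    rw [pvGetD_modify]
    by_cases hea : e = a
    · simp [hea, hrg]; omega
    · simp [hea]
  have hgetM : ∀ a b, a < n → b < n →
      pvMget (M.modify e (fun row => row.set i (1 : Int))) a b =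
      if e = a ∧ i = b then 1 else pvMget M a b := by
    intro a b ha hb
    unfold pvMget
    rw [pvGetD_modify]
    by_cases hea : e = a
    · rw [if_pos ⟨hea, by omega⟩, pvGetD_set]
      subst hea
      by_cases hib : i = b
      · rw [if_pos ⟨hib, by rw [hrow e hen]; omega⟩, if_pos ⟨rfl, hib⟩]
      · rw [if_neg (by simp [hib]), if_neg (by simp [hib])]
    · rw [if_neg (by simp [hea]), if_neg (by simp [hea])]
  refine ⟨by simpa using hrg, by simpa using hM, ?_, ?_, ?_, ?_⟩
  · intro a ha
    unfold pvMget at hgetM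
    rw [pvGetD_modify]
    by_cases hea : e = a
    · rw [if_pos ⟨hea, by omega⟩, List.length_set]
      exact hrow a ha
    · rw [if_neg (by simp [hea])]
      exact hrow a ha
  · intro a b hb
    rw [hgetRg a] at hb
    by_cases hea : e = a
    · rw [if_pos hea] at hb
      rcases List.mem_append.1 hb with hb | hb
      · exact hbnd a b hb
      · rw [List.mem_singleton.1 hb]; exact hi
    · rw [if_neg hea] at hb
      exact hbnd a b hb
  · intro a b ha hb
    rw [hgetM a b ha hb, hgetRg a]
    by_cases hea : e = a
    · by_cases hib : i = b
      · subst hea; subst hib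
        simp only [and_self, if_pos]
        constructor
        · intro _; exact Or.inr (by simp)
        · intro _; trivial
      · rw [if_neg (by simp [hib]), if_pos hea, hiff a b ha hb]
        constructor
        · rintro (h | h)
          · exact Or.inl h
          · exact Or.inr (List.mem_append.2 (Or.inl h))
        · rintro (h | h)
          · exact Or.inl h
          · rcases List.mem_append.1 h with h | h
            · exact Or.inr h
            · exact absurd (List.mem_singleton.1 h).symm hib
    · rw [if_neg (by simp [hea]), if_neg hea]
      exact hiff a b ha hb
  · intro a b ha hb
    rw [hgetM a b ha hb]
    by_cases h : e = a ∧ i = b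
    · rw [if_pos h]; exact Or.inr rfl
    · rw [if_neg h]; exact h01 a b ha hb

theorem pvInvP_foldInner (n i : Nat) (succs : List Int)
    (hb : ∀ s ∈ succs, -(n : Int) ≤ s ∧ s < n) (hi : i < n) :
    ∀ (rg : List (List Nat)) (M : List (List Int)), pvInvP n rg M →
      pvInvP n (succs.foldl (pvUpdRev n i) rg) (succs.foldl (pvUpdMask n i) M) := by
  induction succs with
  | nil => intro rg M h; exact h
  | cons s succs ih =>
    intro rg M h
    exact ih (fun s' hs' => hb s' (by simp [hs'])) (pvUpdRev n i rg s) (pvUpdMask n i M s)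
      (pvInvP_upd n rg M i s h hi (hb s (by simp)).1 (hb s (by simp)).2)

theorem pvInvP_foldOuter (n : Nat) (pairs : List (List Int × Nat))
    (hp : ∀ p ∈ pairs, p.2 < n ∧ ∀ s ∈ p.1, -(n : Int) ≤ s ∧ s < n) :
    ∀ (rg : List (List Nat)) (M : List (List Int)), pvInvP n rg M →
      pvInvP n (pairs.foldl (fun rg p => p.1.foldl (pvUpdRev n p.2) rg) rg)
        (pairs.foldl (fun M p => p.1.foldl (pvUpdMask n p.2) M) M) := by
  induction pairs with
  | nil => intro rg M h; exact h
  | cons p pairs ih =>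
    intro rg M h
    exact ih (fun p' hp' => hp p' (by simp [hp']))
      _ _ (pvInvP_foldInner n p.2 p.1 (hp p (by simp)).2 (hp p (by simp)).1 rg M h)

theorem pvInvP_init (n : Nat) :
    pvInvP n (List.replicate n ([] : List Nat))
      ((List.range n).map (fun i => (List.range n).map (fun j => if i = j then (1 : Int) else 0))) := by
  have hrep : ∀ a, (List.replicate n ([] : List Nat)).getD a [] = [] := by
    intro a
    by_cases ha : a < n
    · rw [List.getD_eq_getElem _ _ (by simpa using ha)]
      simp
    · exact pvGetD_oob _ _ _ (by simpa using Nat.le_of_not_lt ha)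
  refine ⟨by simp, by simp, ?_, ?_, ?_, ?_⟩
  · intro a ha
    rw [pvGetD_mapRange _ _ _ _ ha]
    simp
  · intro a b hb
    rw [hrep a] at hb
    simp at hb
  · intro a b ha hb
    unfold pvMget
    rw [pvGetD_mapRange _ _ _ _ ha, pvGetD_mapRange _ _ _ _ hb, hrep a]
    by_cases hab : a = b <;> simp [hab]
  · intro a b ha hb
    unfold pvMget
    rw [pvGetD_mapRange _ _ _ _ ha, pvGetD_mapRange _ _ _ _ hb]
    by_cases hab : a = b <;> simp [hab]


-- ---- Floyd–Warshall invariant ----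

def pvInvF (rev : List (List Nat)) (n k : Nat) (M : List (List Int)) : Prop :=
  M.length = n ∧ (∀ a, a < n → (M.getD a []).length = n) ∧
  (∀ i j, i < n → j < n → (pvMget M i j = 1 ↔ pvBd rev k i j)) ∧
  (∀ i j, i < n → j < n → (pvMget M i j = 0 ∨ pvMget M i j = 1))

theorem pvFwPhase_get (n : Nat) (M : List (List Int)) (k : Nat)
    (hM : M.length = n)
    (i j : Nat) (hi : i < n) (hj : j < n) :
    pvMget (pvFwPhase n M k) i j =
      if pvMget M i k ≠ 0 ∧ pvMget M k j ≠ 0 then 1 else pvMget M i j := by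
  unfold pvFwPhase pvMget
  have h1 : (M.map (fun row => (List.range n).map (fun j =>
      if row.getD k 0 ≠ 0 ∧ (M.getD k []).getD j 0 ≠ 0 then (1 : Int) else row.getD j 0))).getD i []
      = (List.range n).map (fun j =>
      if (M.getD i []).getD k 0 ≠ 0 ∧ (M.getD k []).getD j 0 ≠ 0 then (1 : Int)
      else (M.getD i []).getD j 0) := by
    rw [List.getD_eq_getElem _ _ (by simpa [hM] using hi), List.getElem_map]
    have hMi : (M[i]'(by omega)) = M.getD i [] := (List.getD_eq_getElem _ _ (by omega)).symm
    rw [hMi]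
  rw [h1, pvGetD_mapRange _ _ _ _ hj]

theorem pvInvF_phase (rev : List (List Nat)) (n k : Nat) (M : List (List Int))
    (hInv : pvInvF rev n k M) (hk : k < n) : pvInvF rev n (k + 1) (pvFwPhase n M k) := by
  obtain ⟨hM, hrow, hiff, h01⟩ := hInv
  have hlen : (pvFwPhase n M k).length = n := by
    unfold pvFwPhase
    simpa using hM
  refine ⟨hlen, ?_, ?_, ?_⟩
  · intro a ha
    unfold pvFwPhase
    rw [List.getD_eq_getElem _ _ (by simpa [hM] using ha), List.getElem_map]
    simp
  · intro i j hi hj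
    rw [pvFwPhase_get n M k hM i j hi hj, pvBd_succ]
    have hik := h01 i k hi hk
    have hkj := h01 k j hk hj
    have hij := h01 i j hi hj
    by_cases hcond : pvMget M i k ≠ 0 ∧ pvMget M k j ≠ 0
    · rw [if_pos hcond]
      have h1v : pvMget M i k = 1 := by
        rcases hik with h | h
        · exact absurd h hcond.1
        · exact h
      have h2v : pvMget M k j = 1 := by
        rcases hkj with h | h
        · exact absurd h hcond.2
        · exact h
      have hbik : pvBd rev k i k := (hiff i k hi hk).1 h1v
      have hbkj : pvBd rev k k j := (hiff k j hk hj).1 h2v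
      exact ⟨fun _ => Or.inr ⟨hbik, hbkj⟩, fun _ => rfl⟩
    · rw [if_neg hcond]
      rw [hiff i j hi hj]
      constructor
      · exact Or.inl
      · rintro (h | ⟨h1, h2⟩)
        · exact h
        · exfalso
          apply hcond
          constructor
          · rw [(hiff i k hi hk).2 h1]; norm_num
          · rw [(hiff k j hk hj).2 h2]; norm_num
  · intro i j hi hj
    rw [pvFwPhase_get n M k hM i j hi hj]
    by_cases hcond : pvMget M i k ≠ 0 ∧ pvMget M k j ≠ 0
    · rw [if_pos hcond]; exact Or.inr rfl
    · rw [if_neg hcond]; exact h01 i j hi hj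

theorem pvInvF_fold (rev : List (List Nat)) (n : Nat) (M0 : List (List Int))
    (h0 : pvInvF rev n 0 M0) :
    ∀ m, m ≤ n → pvInvF rev n m ((List.range m).foldl (pvFwPhase n) M0) := by
  intro m
  induction m with
  | zero => intro _; simpa using h0
  | succ m ih =>
    intro hm
    rw [List.range_succ, List.foldl_append]
    exact pvInvF_phase rev n m _ (ih (by omega)) (by omega)


-- ---- final assembly ----

theorem pvW_nil (rev : List (List Nat)) (n : Nat) (h : rev.length = n) :
    pvW rev n [] = (rev.map List.length).sum := by
  unfold pvW
  have h1 : (List.range n).filter (fun c => c ∉ ([] : List Nat)) = List.range n := by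
    simp
  rw [h1]
  have h2 : (List.range n).map (fun c => (rev.getD c []).length) = rev.map List.length := by
    apply List.ext_getElem
    · simp [h]
    · intro i hi1 hi2
      simp only [List.getElem_map, List.getElem_range]
      rw [List.getD_eq_getElem _ _ (by simp at hi2; omega)]
  rw [h2]

theorem pvFill_length : ∀ (l : List Nat) (r : List Int),
    (l.foldl (fun row p => row.set p (1 : Int)) r).length = r.length := by
  intro l
  induction l with
  | nil => intro r; rfl
  | cons p l ih => intro r; rw [List.foldl_cons, ih]; simp

theorem pvFill_getD : ∀ (l : List Nat) (r : List Int) (j : Nat), j < r.length →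
    (l.foldl (fun row p => row.set p (1 : Int)) r).getD j 0 =
      if j ∈ l then 1 else r.getD j 0 := by
  intro l
  induction l with
  | nil => intro r j _; simp
  | cons p l ih =>
    intro r j hj
    rw [List.foldl_cons, ih (r.set p 1) j (by simpa using hj), pvGetD_set]
    by_cases hjl : j ∈ l
    · rw [if_pos hjl, if_pos (by simp [hjl])]
    · rw [if_neg hjl]
      by_cases hpj : p = j
      · rw [if_pos ⟨hpj, hj⟩, if_pos (by simp [hpj])]
      · rw [if_neg (by simp [hpj]), if_neg ?_]
        simp only [List.mem_cons]
        rintro (rfl | h)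
        · exact hpj rfl
        · exact hjl h

theorem pvGetD_replicate (n : Nat) (x : Int) (j : Nat) :
    (List.replicate n x).getD j x = x := by
  by_cases h : j < n
  · rw [List.getD_eq_getElem _ _ (by simpa using h)]
    simp
  · exact pvGetD_oob _ _ _ (by simpa using Nat.le_of_not_lt h)

theorem pvMain (sl : List (List Int)) (hpre : Pre_successor_list_to_mask sl) :
    successor_list_to_mask sl = successor_list_to_mask_alt sl := by
  classical
  set n := sl.length with hn
  have hpairs : ∀ p ∈ sl.zipIdx, p.2 < n ∧ ∀ s ∈ p.1, -(n : Int) ≤ s ∧ s < n := by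
    rintro ⟨x, i⟩ hp
    have h := List.mem_zipIdx hp
    refine ⟨by omega, ?_⟩
    intro s hs
    have hx : x ∈ sl := by
      have := h.2.2
      simp only [Nat.sub_zero] at this
      rw [this]
      exact List.getElem_mem _
    exact hpre x hx s hs
  have hInvP := pvInvP_foldOuter n sl.zipIdx hpairs (List.replicate n [])
    ((List.range n).map (fun i => (List.range n).map (fun j => if i = j then (1 : Int) else 0)))
    (pvInvP_init n)
  obtain ⟨hrglen, hM0len, hM0row, hrevbnd, hiff0, h010⟩ := hInvP
  set rev := pvBuildRev sl with hrevdef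
  set M0 := sl.zipIdx.foldl (fun M p => p.1.foldl (pvUpdMask n p.2) M)
    ((List.range n).map (fun i => (List.range n).map (fun j => if i = j then (1 : Int) else 0)))
    with hM0def
  have hrevfold : rev = sl.zipIdx.foldl (fun rg p => p.1.foldl (pvUpdRev n p.2) rg)
      (List.replicate n []) := rfl
  rw [← hrevfold] at hrglen hrevbnd hiff0
  have hInvF0 : pvInvF rev n 0 M0 := by
    refine ⟨hM0len, hM0row, ?_, h010⟩
    intro i j hi hj
    rw [hiff0 i j hi hj, pvBd_zero]
  have hInvF := pvInvF_fold rev n M0 hInvF0 n le_rfl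
  obtain ⟨hBlen, hBrow, hBiff, hB01⟩ := hInvF
  set fuel := 1 + (rev.map List.length).sum with hfueldef
  have hWnil : pvW rev n [] = (rev.map List.length).sum := pvW_nil rev n hrglen
  have hmaster : ∀ i, i < n →
      (∀ x ∈ [i], x ∈ pvBfs rev fuel [i] []) ∧ (∀ c ∈ ([] : List Nat), c ∈ pvBfs rev fuel [i] []) ∧
      (∀ c ∈ pvBfs rev fuel [i] [], c < n) ∧
      (∀ c ∈ pvBfs rev fuel [i] [], ∀ x ∈ rev.getD c [], x ∈ pvBfs rev fuel [i] []) := by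
    intro i hi
    refine pvBfs_master rev n hrevbnd fuel [i] [] ?_ ?_ (by simp) (by simp)
    · rw [hfueldef, ← hWnil]; simp
    · intro x hx; rw [List.mem_singleton.1 hx]; exact hi
  have hV : ∀ i, i < n → ∀ j, j ∈ pvBfs rev fuel [i] [] ↔ pvBd rev n i j := by
    intro i hi j
    constructor
    · intro hj
      refine pvBfs_sound rev n i hrevbnd fuel [i] [] ?_ (by simp) ?_ j hj
      · intro x hx; rw [List.mem_singleton.1 hx]; exact pvBd_refl rev n i
      · intro x hx; rw [List.mem_singleton.1 hx]; exact hi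
    · intro hbd
      exact pvBfs_reaches rev n _ i ((hmaster i hi).1 i (by simp)) (hmaster i hi).2.2.2 j hbd
  have hA : successor_list_to_mask sl =
      (List.range n).map (fun i =>
        (((List.range n).map (fun node => pvBfs rev fuel [node] [])).getD i []).foldl
          (fun row p => row.set p (1 : Int)) (List.replicate n (0 : Int))) := rfl
  have hB : successor_list_to_mask_alt sl = (List.range n).foldl (pvFwPhase n) M0 := rfl
  rw [hA, hB]
  apply List.ext_getElem
  · rw [hBlen]; simp
  · intro i hi1 hi2
    have hi : i < n := by simpa using hi1
    rw [List.getElem_map, List.getElem_range]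
    have hrowB : ((List.range n).foldl (pvFwPhase n) M0)[i] =
        ((List.range n).foldl (pvFwPhase n) M0).getD i [] :=
      (List.getD_eq_getElem _ _ (by omega)).symm
    rw [hrowB]
    have hpreds : (((List.range n).map (fun node => pvBfs rev fuel [node] [])).getD i []) =
        pvBfs rev fuel [i] [] := pvGetD_mapRange _ _ _ _ hi
    rw [hpreds]
    apply List.ext_getElem
    · rw [pvFill_length, hBrow i hi]; simp
    · intro j hj1 hj2
      have hj : j < n := by
        rw [pvFill_length] at hj1; simpa using hj1
      have hLa : ((pvBfs rev fuel [i] []).foldl (fun row p => row.set p (1 : Int))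
          (List.replicate n 0))[j]'hj1 = ((pvBfs rev fuel [i] []).foldl
          (fun row p => row.set p (1 : Int)) (List.replicate n 0)).getD j 0 :=
        (List.getD_eq_getElem _ _ hj1).symm
      have hLb : (((List.range n).foldl (pvFwPhase n) M0).getD i [])[j]'hj2 =
          pvMget ((List.range n).foldl (pvFwPhase n) M0) i j :=
        (List.getD_eq_getElem _ _ hj2).symm
      rw [hLa, hLb, pvFill_getD _ _ _ (by simpa using hj), pvGetD_replicate]
      by_cases hbd : pvBd rev n i j
      · rw [if_pos ((hV i hi j).2 hbd)]
        exact ((hBiff i j hi hj).2 hbd).symm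
      · rw [if_neg (fun h => hbd ((hV i hi j).1 h))]
        rcases hB01 i j hi hj with h | h
        · exact h.symm
        · exact absurd ((hBiff i j hi hj).1 h) hbd

-- ===== VERDICT (by name: the statement is the Claim_ definition above) =====
theorem successor_list_to_mask_spec : Claim_equal_successor_list_to_mask := by
  intro sl _ hpre
  exact pvMain sl hpre
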